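-- pv_equiv track=rewrite | github.com/cabanmichal/aoc2021 | 08_seven_segment_search/solution_day_08.py | wires_to_digits
-- ===== SOURCE A (Python) =====
-- from typing import List, Tuple, Dict, Set
--
-- EASY_DIGITS_LENGTHS = {2: "cf", 3: "acf", 4: "bcdf", 7: "abcdefg"}
--
-- def wires_to_digits(patterns: List[str]) -> Dict[str, str]:
--     """Return mapping of scrambled control wires to "easy digits" (1, 4, 7, 8).
--
--     Keys are sorted by length.
--     """
--     mapping = {}
--     for pattern in sorted(patterns, key=len):
--         digit = EASY_DIGITS_LENGTHS.get(len(pattern))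
--         if digit is None:
--             continue
--         mapping[pattern] = digit
--
--     return mapping
-- ===== SOURCE B (Python) =====
-- from typing import List, Dict
--
-- EASY_DIGITS_LENGTHS = {2: "cf", 3: "acf", 4: "bcdf", 7: "abcdefg"}
--
-- def wires_to_digits(patterns: List[str]) -> Dict[str, str]:
--     """Return mapping of scrambled control wires to "easy digits" (1, 4, 7, 8).
--
--     Keys are sorted by length: no sort needed — scan the list once per easy
--     length, in ascending order of length (2, 3, 4, 7).
--     """
--     mapping = {}
--     for length, digit in ((2, "cf"), (3, "acf"), (4, "bcdf"), (7, "abcdefg")):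
--         for pattern in patterns:
--             if len(pattern) == length:
--                 mapping[pattern] = digit
--     return mapping
-- ===== Notes on version B (the rewrite author's own statement) =====
-- stated objective: simpler
-- what changed: B drops A's stable sort of the whole pattern list and instead makes one plain scan of the original list per easy length, iterating the four (length, digit) pairs in ascending length order; equal-length patterns keep their input order, reproducing the sorted dict exactly.
import Mathlib
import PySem

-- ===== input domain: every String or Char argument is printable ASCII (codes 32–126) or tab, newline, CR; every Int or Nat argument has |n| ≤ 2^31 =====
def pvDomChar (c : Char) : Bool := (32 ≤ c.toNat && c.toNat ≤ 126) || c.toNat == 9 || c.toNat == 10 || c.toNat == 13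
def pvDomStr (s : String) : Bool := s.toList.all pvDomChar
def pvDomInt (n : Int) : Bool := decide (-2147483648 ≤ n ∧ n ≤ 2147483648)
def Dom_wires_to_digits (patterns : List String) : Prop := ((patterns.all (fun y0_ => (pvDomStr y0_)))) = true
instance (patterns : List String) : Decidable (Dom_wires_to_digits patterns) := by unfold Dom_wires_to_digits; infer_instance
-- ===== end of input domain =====

-- B replaces A's stable sort of the whole input by four plain scans of the
-- original list, one per easy length in ascending order (2, 3, 4, 7): simpler, no sort.

-- ===== PORT A =====
-- EASY_DIGITS_LENGTHS = {2: "cf", 3: "acf", 4: "bcdf", 7: "abcdefg"}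
def pvEasy : PySem.Dict Int String := ⟨[(2, "cf"), (3, "acf"), (4, "bcdf"), (7, "abcdefg")]⟩

def wires_to_digits (patterns : List String) : List (String × String) :=
  ((PySem.List.sorted patterns (fun p => PySem.Str.len p)).foldl
    (fun mapping pattern =>
      match PySem.Dict.get? pvEasy (PySem.Str.len pattern) with
      | none => mapping
      | some digit => PySem.Dict.insert mapping pattern digit)
    (⟨[]⟩ : PySem.Dict String String)).items

-- ===== PORT B =====
def wires_to_digits_alt (patterns : List String) : List (String × String) :=
  (([((2 : Int), "cf"), (3, "acf"), (4, "bcdf"), (7, "abcdefg")]).foldl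
    (fun mapping ld =>
      (patterns.filter (fun p => PySem.Str.len p == ld.1)).foldl
        (fun m p => PySem.Dict.insert m p ld.2) mapping)
    (⟨[]⟩ : PySem.Dict String String)).items

-- ===== PRECONDITION & SPEC =====
def Spec_wires_to_digits (patterns : List String) (out : List (String × String)) : Prop := out = wires_to_digits_alt patterns
instance (patterns : List String) (out : List (String × String)) : Decidable (Spec_wires_to_digits patterns out) := by unfold Spec_wires_to_digits; infer_instance

-- ===== CLAIM (what is proved, stated in full; the proofs are below) =====
def Claim_equal_wires_to_digits : Prop := ∀ (patterns : List String), Dom_wires_to_digits patterns → Spec_wires_to_digits patterns (wires_to_digits patterns)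

-- ===== LEMMAS AND PROOFS =====

-- insertBy with an element the predicate rejects does not change the filtered sublist
lemma pv_filter_insertBy_neg {α : Type} (P : α → Bool) (bef : α → α → Bool) (x : α)
    (ys : List α) (hx : P x = false) :
    (PySem.List.insertBy bef x ys).filter P = ys.filter P := by
  induction ys with
  | nil => simp [PySem.List.insertBy, hx]
  | cons y ys ih =>
    by_cases h : bef x y = true
    · simp [PySem.List.insertBy, h, hx]
    · simp only [PySem.List.insertBy, h, if_neg, Bool.false_eq_true, not_false_iff,
        List.filter_cons]
      split <;> simp [ih]

-- insertBy keeps the list sorted by key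
lemma pv_pairwise_insertBy {α : Type} (key : α → Int) (x : α) (ys : List α)
    (h : ys.Pairwise (fun a b => key a ≤ key b)) :
    (PySem.List.insertBy (fun a b => decide (key a < key b)) x ys).Pairwise
      (fun a b => key a ≤ key b) := by
  induction ys with
  | nil => simp [PySem.List.insertBy]
  | cons y ys ih =>
    rcases List.pairwise_cons.mp h with ⟨hy, hys⟩
    by_cases hlt : key x < key y
    · simp only [PySem.List.insertBy, hlt, decide_true, if_true]
      refine List.pairwise_cons.mpr ⟨?_, h⟩
      intro b hb
      rcases List.mem_cons.mp hb with rfl | hb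
      · omega
      · have := hy b hb; omega
    · simp only [PySem.List.insertBy, hlt, decide_false, Bool.false_eq_true, if_false]
      refine List.pairwise_cons.mpr ⟨?_, ih hys⟩
      intro b hb
      rcases (PySem.List.mem_insertBy _ _ _ _).mp hb with rfl | hb
      · omega
      · exact hy b hb

-- inserting an accepted element into a sorted list appends it to its key class
lemma pv_filter_insertBy_pos {α : Type} (key : α → Int) (c : Int) (x : α) (ys : List α)
    (h : ys.Pairwise (fun a b => key a ≤ key b)) (hx : key x = c) :
    (PySem.List.insertBy (fun a b => decide (key a < key b)) x ys).filter
        (fun p => key p == c)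
      = ys.filter (fun p => key p == c) ++ [x] := by
  induction ys with
  | nil => simp [PySem.List.insertBy, hx]
  | cons y ys ih =>
    rcases List.pairwise_cons.mp h with ⟨hy, hys⟩
    by_cases hlt : key x < key y
    · simp only [PySem.List.insertBy, hlt, decide_true, if_true]
      have hnil : (y :: ys).filter (fun p => key p == c) = [] := by
        apply List.filter_eq_nil_iff.mpr
        intro b hb
        rcases List.mem_cons.mp hb with rfl | hb
        · simp; omega
        · have := hy b hb; simp; omega
      have hstep : (x :: y :: ys).filter (fun p => key p == c)
          = x :: ((y :: ys).filter (fun p => key p == c)) := by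
        rw [List.filter_cons]; simp [hx]
      rw [hstep, hnil]
      simp
    · simp only [PySem.List.insertBy, hlt, decide_false, Bool.false_eq_true, if_false,
        List.filter_cons]
      split <;> simp [ih hys]

-- the insertion-sort fold, filtered to one key class, keeps the original order
lemma pv_filter_foldl {α : Type} (key : α → Int) (c : Int) :
    ∀ (xs acc : List α), acc.Pairwise (fun a b => key a ≤ key b) →
      ((xs.foldl (fun acc x =>
          PySem.List.insertBy (fun a b => decide (key a < key b)) x acc) acc).filter
        (fun p => key p == c))
      = acc.filter (fun p => key p == c) ++ xs.filter (fun p => key p == c) := by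
  intro xs
  induction xs with
  | nil => intro acc _; simp
  | cons x xs ih =>
    intro acc hacc
    have hacc' := pv_pairwise_insertBy key x acc hacc
    rw [List.foldl_cons, ih _ hacc', List.filter_cons]
    by_cases hx : key x = c
    · rw [pv_filter_insertBy_pos key c x acc hacc hx]
      simp [hx]
    · rw [pv_filter_insertBy_neg _ _ _ _ (by simp [hx])]
      simp [hx]

-- stability of A's sort: one key class of the sorted list is that of the input
lemma pv_stable (c : Int) (xs : List String) :
    (PySem.List.sorted xs (fun p => PySem.Str.len p)).filter
        (fun p => PySem.Str.len p == c)
      = xs.filter (fun p => PySem.Str.len p == c) := by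
  rw [PySem.List.sorted_eq_foldl_insertBy]
  simpa using pv_filter_foldl (fun p => PySem.Str.len p) c xs [] (by simp)

-- A's skip-or-insert fold is the insert fold over the filterMapped sequence
lemma pv_fold_match :
    ∀ (l : List String) (m : PySem.Dict String String),
      l.foldl (fun mapping pattern =>
          match PySem.Dict.get? pvEasy (PySem.Str.len pattern) with
          | none => mapping
          | some digit => PySem.Dict.insert mapping pattern digit) m
      = (l.filterMap (fun p =>
            (PySem.Dict.get? pvEasy (PySem.Str.len p)).map (fun d => (p, d)))).foldl
          (fun m pd => PySem.Dict.insert m pd.1 pd.2) m := by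
  intro l
  induction l with
  | nil => intro m; rfl
  | cons p t ih =>
    intro m
    cases hg : PySem.Dict.get? pvEasy (PySem.Str.len p) with
    | none =>
      simp only [List.foldl_cons, List.filterMap_cons, hg, Option.map_none]
      exact ih _
    | some d =>
      simp only [List.foldl_cons, List.filterMap_cons, hg, Option.map_some]
      exact ih _

-- the easy-digit table lookup, written out
lemma pv_get (n : Int) :
    PySem.Dict.get? pvEasy n =
      if n = 2 then some "cf" else if n = 3 then some "acf"
      else if n = 4 then some "bcdf" else if n = 7 then some "abcdefg" else none := by
  by_cases h2 : n = 2 <;> by_cases h3 : n = 3 <;> by_cases h4 : n = 4 <;>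
    by_cases h7 : n = 7 <;> (simp_all [pvEasy, PySem.Dict.get?]; try omega)

-- a sorted-by-length list, filterMapped through the easy-digit table, splits
-- into its length-2, 3, 4, 7 classes in that order
lemma pv_group (l : List String)
    (h : l.Pairwise (fun a b => PySem.Str.len a ≤ PySem.Str.len b)) :
    l.filterMap (fun p =>
        (PySem.Dict.get? pvEasy (PySem.Str.len p)).map (fun d => (p, d)))
      = (l.filter (fun p => PySem.Str.len p == 2)).map (fun p => (p, "cf"))
        ++ (l.filter (fun p => PySem.Str.len p == 3)).map (fun p => (p, "acf"))
        ++ (l.filter (fun p => PySem.Str.len p == 4)).map (fun p => (p, "bcdf"))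
        ++ (l.filter (fun p => PySem.Str.len p == 7)).map (fun p => (p, "abcdefg")) := by
  induction l with
  | nil => rfl
  | cons p t ih =>
    rcases List.pairwise_cons.mp h with ⟨hp, ht⟩
    have ih := ih ht
    have hnil : ∀ c : Int, c < PySem.Str.len p →
        t.filter (fun q => PySem.Str.len q == c) = [] := by
      intro c hc
      apply List.filter_eq_nil_iff.mpr
      intro q hq
      have hpq := hp q hq
      simp only [PySem.Str.len, String.length_toList] at hpq hc ⊢
      simp only [beq_iff_eq]
      omega
    rw [List.filterMap_cons, ih, pv_get]
    by_cases h2 : PySem.Str.len p = 2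
    · rw [if_pos h2]
      simp only [PySem.Str.len, String.length_toList] at h2
      simp [h2]
    · by_cases h3 : PySem.Str.len p = 3
      · rw [if_neg h2, if_pos h3]
        have e2 := hnil 2 (by omega)
        simp only [PySem.Str.len, String.length_toList] at h3 e2
        simp [h3, e2]
      · by_cases h4 : PySem.Str.len p = 4
        · rw [if_neg h2, if_neg h3, if_pos h4]
          have e2 := hnil 2 (by omega)
          have e3 := hnil 3 (by omega)
          simp only [PySem.Str.len, String.length_toList] at h4 e2 e3
          simp [h4, e2, e3]
        · by_cases h7 : PySem.Str.len p = 7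
          · rw [if_neg h2, if_neg h3, if_neg h4, if_pos h7]
            have e2 := hnil 2 (by omega)
            have e3 := hnil 3 (by omega)
            have e4 := hnil 4 (by omega)
            simp only [PySem.Str.len, String.length_toList] at h7 e2 e3 e4
            simp [h7, e2, e3, e4]
          · rw [if_neg h2, if_neg h3, if_neg h4, if_neg h7]
            simp only [PySem.Str.len, String.length_toList] at h2 h3 h4 h7
            simp [h2, h3, h4, h7]

-- ===== VERDICT (by name: the statement is the Claim_ definition above) =====
theorem wires_to_digits_spec : Claim_equal_wires_to_digits := by
  intro patterns _
  unfold Spec_wires_to_digits wires_to_digits wires_to_digits_alt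
  rw [pv_fold_match,
    pv_group _ (PySem.List.sorted_pairwise patterns (fun p => PySem.Str.len p)),
    pv_stable, pv_stable, pv_stable, pv_stable]
  simp [List.foldl_append, List.foldl_map]
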